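-- pv_equiv track=rewrite | github.com/Rcm89/Proyecto1-GameZone-Python | src/preguntados.py | verificar_respuesta
-- ===== SOURCE A (Python) =====
-- def verificar_respuesta(pregunta, respuesta_usuario):
--     """
--     Verifica si la respuesta del usuario es correcta.
--
--     Args:
--         pregunta (dict): Diccionario con la pregunta y respuestas.
--         respuesta_usuario (str): La opción elegida por el usuario.
--
--     Returns:
--         tuple: (bool, str) Indica si es correcta y cuál es la opción correcta.
--     """
--     respuestas = pregunta['Respuestas']
--     respuesta_correcta = ''
--     es_correcta = False
--
--     for opcion_texto, valor in respuestas.items():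
--         opcion = opcion_texto.split(')')[0]  # Extrae la letra de la opción
--         if valor:
--             respuesta_correcta = opcion
--         if opcion == respuesta_usuario:
--             es_correcta = valor
--
--     return es_correcta, respuesta_correcta
-- ===== SOURCE B (Python) =====
-- def verificar_respuesta(pregunta, respuesta_usuario):
--     """Scan the options back-to-front with early exit: the last matching
--     option decides correctness, the last truthy option is the correct one."""
--     items = list(pregunta['Respuestas'].items())
--     es_correcta = False
--     for texto, valor in reversed(items):
--         if texto.split(')')[0] == respuesta_usuario:
--             es_correcta = valor
--             break
--     respuesta_correcta = ''
--     for texto, valor in reversed(items):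
--         if valor:
--             respuesta_correcta = texto.split(')')[0]
--             break
--     return es_correcta, respuesta_correcta
-- ===== Notes on version B (the rewrite author's own statement) =====
-- stated objective: alternative
-- what changed: Instead of one forward fold that keeps overwriting two accumulators, B scans the options in reverse and stops at the first hit for each of the two answers (last match / last truthy option), with no accumulator rewriting.
import Mathlib
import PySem

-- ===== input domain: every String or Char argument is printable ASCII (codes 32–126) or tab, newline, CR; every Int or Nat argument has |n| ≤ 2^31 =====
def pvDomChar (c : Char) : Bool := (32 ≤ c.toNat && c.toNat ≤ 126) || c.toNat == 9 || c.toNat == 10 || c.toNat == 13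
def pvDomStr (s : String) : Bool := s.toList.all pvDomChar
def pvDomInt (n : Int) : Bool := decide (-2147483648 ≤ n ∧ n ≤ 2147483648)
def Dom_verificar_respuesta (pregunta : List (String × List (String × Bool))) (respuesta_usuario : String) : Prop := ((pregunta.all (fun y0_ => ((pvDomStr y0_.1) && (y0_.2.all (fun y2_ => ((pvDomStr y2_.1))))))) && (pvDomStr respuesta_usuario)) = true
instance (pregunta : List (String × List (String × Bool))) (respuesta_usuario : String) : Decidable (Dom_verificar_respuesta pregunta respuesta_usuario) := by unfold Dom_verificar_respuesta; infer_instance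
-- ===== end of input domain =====

-- B replaces A's forward fold with two reverse scans with early exit (first hit in
-- reverse = last match forward); alternative decomposition, same cost.


-- ===== PORT A =====
-- opcion_texto.split(')')[0] (split? is some since the separator is nonempty; the
-- result list is always nonempty so [0] never raises)
def pvLetra (t : String) : String := ((PySem.Str.split? t ")").getD []).headD ""

def verificar_respuesta (pregunta : List (String × List (String × Bool))) (respuesta_usuario : String) : Bool × String :=
  -- pregunta['Respuestas']: first match; Pre_ guarantees the key is present
  let respuestas := ((pregunta.find? (fun p => p.1 == "Respuestas")).map Prod.snd).getD []
  let st := respuestas.foldl (fun (st : String × Bool) p =>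
    let opcion := pvLetra p.1
    let respuesta_correcta := if p.2 then opcion else st.1
    let es_correcta := if opcion == respuesta_usuario then p.2 else st.2
    (respuesta_correcta, es_correcta)) ("", false)
  (st.2, st.1)

-- ===== PORT B =====
def verificar_respuesta_alt (pregunta : List (String × List (String × Bool))) (respuesta_usuario : String) : Bool × String :=
  let items := ((pregunta.find? (fun p => p.1 == "Respuestas")).map Prod.snd).getD []
  let rev := items.reverse
  let es_correcta := match rev.find? (fun p => pvLetra p.1 == respuesta_usuario) with
    | some p => p.2
    | none => false
  let respuesta_correcta := match rev.find? (fun p => p.2) with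
    | some p => pvLetra p.1
    | none => ""
  (es_correcta, respuesta_correcta)

-- ===== PRECONDITION & SPEC =====
-- Pre_ excludes exactly the inputs where A raises KeyError: 'Respuestas' not a key of pregunta
def Pre_verificar_respuesta (pregunta : List (String × List (String × Bool))) (respuesta_usuario : String) : Prop :=
  (pregunta.map Prod.fst).contains "Respuestas" = true
instance (pregunta : List (String × List (String × Bool))) (respuesta_usuario : String) : Decidable (Pre_verificar_respuesta pregunta respuesta_usuario) := by unfold Pre_verificar_respuesta; infer_instance

def pvWitness_verificar_respuesta : (List (String × List (String × Bool))) × String :=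
  ([("Respuestas", [("a) uno", false), ("b) dos", true)])], "b")

def Spec_verificar_respuesta (pregunta : List (String × List (String × Bool))) (respuesta_usuario : String) (out : Bool × String) : Prop := out = verificar_respuesta_alt pregunta respuesta_usuario
instance (pregunta : List (String × List (String × Bool))) (respuesta_usuario : String) (out : Bool × String) : Decidable (Spec_verificar_respuesta pregunta respuesta_usuario out) := by unfold Spec_verificar_respuesta; infer_instance

-- ===== CLAIM (what is proved, stated in full; the proofs are below) =====
def Claim_equal_verificar_respuesta : Prop := ∀ (pregunta : List (String × List (String × Bool))) (respuesta_usuario : String), Dom_verificar_respuesta pregunta respuesta_usuario → Pre_verificar_respuesta pregunta respuesta_usuario → Spec_verificar_respuesta pregunta respuesta_usuario (verificar_respuesta pregunta respuesta_usuario)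

-- ===== LEMMAS AND PROOFS =====
-- A's fold = B's reverse finds, for any initial accumulators
theorem foldA_eq (ru : String) (l : List (String × Bool)) (rc : String) (es : Bool) :
    l.foldl (fun (st : String × Bool) p =>
      (if p.2 then pvLetra p.1 else st.1,
       if pvLetra p.1 == ru then p.2 else st.2)) (rc, es) =
    ((match l.reverse.find? (fun p => p.2) with | some p => pvLetra p.1 | none => rc),
     (match l.reverse.find? (fun p => pvLetra p.1 == ru) with | some p => p.2 | none => es)) := by
  induction l generalizing rc es with
  | nil => simp
  | cons x l ih =>
    simp only [List.foldl_cons, ih, List.reverse_cons, List.find?_append]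
    cases h1 : l.reverse.find? (fun p => p.2) <;>
      cases h2 : l.reverse.find? (fun p => pvLetra p.1 == ru) <;>
      by_cases hv : x.2 = true <;> by_cases hm : pvLetra x.1 = ru <;>
      simp_all [List.find?, Option.or] <;>
      simp [beq_eq_false_iff_ne.mpr hm]

-- ===== VERDICT (by name: the statement is the Claim_ definition above) =====
theorem verificar_respuesta_spec : Claim_equal_verificar_respuesta := by
  intro pregunta ru _ _
  show _ = _
  simp only [verificar_respuesta, verificar_respuesta_alt, foldA_eq]
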